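-- pv_equiv track=rewrite | github.com/Giansn/mira | skills/code-generation-analysis/code_analyzer.py | _get_line_at_position
-- ===== SOURCE A (Python) =====
-- def _get_line_at_position(code: str, position: int) -> str:
--     """Get the line containing a specific position."""
--     lines = code.split('\n')
--     char_count = 0
--     for i, line in enumerate(lines):
--         char_count += len(line) + 1  # +1 for newline
--         if char_count > position:
--             return line
--     return lines[-1] if lines else ""
-- ===== SOURCE B (Python) =====
-- def _get_line_at_position(code: str, position: int) -> str:
--     """Get the line containing a specific position."""
--     lines = code.split('\n')
--     # the line index is the number of newlines strictly before the position
--     # (clamped at 0; a position past the end lands on the last line)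
--     return lines[code[:max(position, 0)].count('\n')]
-- ===== Notes on version B (the rewrite author's own statement) =====
-- stated objective: simpler
-- what changed: Replaces the enumerate loop that accumulates line lengths with a direct index computation: the line index is the newline count in the prefix code[:max(position,0)], then one list lookup.
import Mathlib
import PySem

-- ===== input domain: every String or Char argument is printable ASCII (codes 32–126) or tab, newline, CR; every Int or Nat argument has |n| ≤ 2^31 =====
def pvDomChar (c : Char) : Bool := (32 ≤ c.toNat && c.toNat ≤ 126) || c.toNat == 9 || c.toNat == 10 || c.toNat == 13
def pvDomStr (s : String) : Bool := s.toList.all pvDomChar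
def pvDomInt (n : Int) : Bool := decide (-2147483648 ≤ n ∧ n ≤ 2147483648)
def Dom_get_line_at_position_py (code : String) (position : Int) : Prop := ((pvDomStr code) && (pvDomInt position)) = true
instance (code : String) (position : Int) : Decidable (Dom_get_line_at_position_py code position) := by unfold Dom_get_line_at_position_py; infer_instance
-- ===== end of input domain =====

-- B replaces A's accumulate-and-compare loop over the lines by a direct index
-- computation (newline count in the clamped prefix) plus one list lookup; objective: simpler.

-- ===== PORT A =====
-- the 'for i, line in enumerate(lines)' loop: char_count accumulates, first line with char_count > position
def pvALoop (position : Int) : List String → Int → Option String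
  | [], _ => none
  | line :: rest, char_count =>
    let char_count := char_count + PySem.Str.len line + 1  -- +1 for newline
    if char_count > position then some line else pvALoop position rest char_count

def get_line_at_position_py (code : String) (position : Int) : String :=
  let lines := (PySem.Str.split? code "\n").getD []  -- code.split('\n'); sep ≠ "" so split? is always some
  match pvALoop position lines 0 with
  | some line => line
  | none =>  -- 'return lines[-1] if lines else ""'
    if lines.isEmpty then "" else (PySem.List.pyGet? lines (-1)).getD ""

-- ===== PORT B =====
def get_line_at_position_py_alt (code : String) (position : Int) : String :=
  let lines := (PySem.Str.split? code "\n").getD []  -- code.split('\n')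
  -- lines[code[:max(position, 0)].count('\n')]; the index is always < len(lines), so the default is unreachable
  lines.getD (PySem.Str.count (PySem.Str.slice code none (some (max position 0))) "\n") ""

-- ===== PRECONDITION & SPEC =====
def Spec_get_line_at_position_py (code : String) (position : Int) (out : String) : Prop := out = get_line_at_position_py_alt code position
instance (code : String) (position : Int) (out : String) : Decidable (Spec_get_line_at_position_py code position out) := by unfold Spec_get_line_at_position_py; infer_instance

-- ===== CLAIM (what is proved, stated in full; the proofs are below) =====
def Claim_equal_get_line_at_position_py : Prop := ∀ (code : String) (position : Int), Dom_get_line_at_position_py code position → Spec_get_line_at_position_py code position (get_line_at_position_py code position)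

-- ===== LEMMAS AND PROOFS =====

-- split of a List Char at newlines, in a shape convenient for induction
def mySplit : List Char → List (List Char)
  | [] => [[]]
  | c :: r => if c = '\n' then [] :: mySplit r else (mySplit r).modifyHead (c :: ·)

-- join with newlines (inverse of mySplit)
def joinNL : List (List Char) → List Char
  | [] => []
  | [l] => l
  | l :: rest => l ++ '\n' :: joinNL rest

-- A's loop at the List Char level
def pvCLoop (position : Int) : List (List Char) → Int → Option (List Char)
  | [], _ => none
  | l :: rest, cc =>
    let cc := cc + l.length + 1
    if cc > position then some l else pvCLoop position rest cc

-- A's whole result at the List Char level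
def resC (p : Int) (ls : List (List Char)) : List Char :=
  match pvCLoop p ls 0 with
  | some l => l
  | none => ls.getLast?.getD []

theorem mySplit_ne_nil (cs : List Char) : mySplit cs ≠ [] := by
  induction cs with
  | nil => simp [mySplit]
  | cons c r ih =>
    simp only [mySplit]
    split_ifs
    · simp
    · cases h : mySplit r with
      | nil => exact absurd h ih
      | cons a t => simp [List.modifyHead]

theorem free_mySplit (cs : List Char) : ∀ l ∈ mySplit cs, '\n' ∉ l := by
  induction cs with
  | nil => simp [mySplit]
  | cons c r ih =>
    intro l hl
    simp only [mySplit] at hl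
    split_ifs at hl with hc
    · rcases List.mem_cons.mp hl with h | h
      · simp [h]
      · exact ih l h
    · cases hsp : mySplit r with
      | nil => exact absurd hsp (mySplit_ne_nil r)
      | cons a t =>
        rw [hsp] at hl
        simp only [List.modifyHead] at hl
        rcases List.mem_cons.mp hl with h | h
        · have ha := ih a (by rw [hsp]; exact List.mem_cons_self)
          rw [h]
          simp [ha]
          exact Ne.symm hc
        · exact ih l (by rw [hsp]; exact List.mem_cons_of_mem _ h)

theorem joinNL_mySplit (cs : List Char) : joinNL (mySplit cs) = cs := by
  induction cs with
  | nil => simp [mySplit, joinNL]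
  | cons c r ih =>
    simp only [mySplit]
    split_ifs with hc
    · subst hc
      cases hsp : mySplit r with
      | nil => exact absurd hsp (mySplit_ne_nil r)
      | cons a t => rw [hsp] at ih; simp [joinNL, ih]
    · cases hsp : mySplit r with
      | nil => exact absurd hsp (mySplit_ne_nil r)
      | cons a t =>
        rw [hsp] at ih
        cases t with
        | nil => simp_all [joinNL, List.modifyHead]
        | cons a2 t2 => simp_all [joinNL, List.modifyHead]

-- the fuel recursion of PySem.Chars.splitOn, characterised for sep = ['\n']
theorem splitOn_go_newline : ∀ (fuel : Nat) (l cur : List Char) (acc : List (List Char)),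
    l.length < fuel →
    PySem.Chars.splitOn.go ['\n'] fuel l cur acc
      = acc.reverse ++ (mySplit l).modifyHead (cur.reverse ++ ·) := by
  intro fuel
  induction fuel with
  | zero => intro l cur acc h; omega
  | succ f ih =>
    intro l cur acc h
    cases l with
    | nil => simp [PySem.Chars.splitOn.go, mySplit]
    | cons c rest =>
      by_cases hc : c = '\n'
      · subst hc
        rw [PySem.Chars.splitOn.go]
        have hpre : List.isPrefixOf ['\n'] ('\n' :: rest) = true := by simp [List.isPrefixOf]
        rw [if_pos hpre]
        rw [show List.drop (List.length ['\n']) ('\n'::rest) = rest by simp]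
        rw [ih rest [] (List.reverse cur :: acc) (by simpa using Nat.lt_of_succ_lt_succ h)]
        simp [mySplit]
        cases mySplit rest <;> simp [List.modifyHead]
      · rw [PySem.Chars.splitOn.go]
        have hpre : List.isPrefixOf ['\n'] (c :: rest) = false := by
          simp [List.isPrefixOf]; exact fun hh => absurd hh.symm hc
        rw [if_neg (by simp [hpre])]
        rw [ih rest (c :: cur) acc (by simpa using Nat.lt_of_succ_lt_succ h)]
        simp [mySplit, hc]
        cases mySplit rest <;> simp [List.modifyHead]

theorem splitOn_newline (cs : List Char) :
    PySem.Chars.splitOn cs ['\n'] = mySplit cs := by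
  rw [PySem.Chars.splitOn, splitOn_go_newline (cs.length + 1) cs [] [] (by omega)]
  simp
  cases mySplit cs <;> simp [List.modifyHead]

-- the fuel recursion of PySem.Chars.count, characterised for sub = ['\n']
theorem count_go_newline : ∀ (fuel : Nat) (l : List Char) (acc : Nat),
    l.length ≤ fuel →
    PySem.Chars.count.go ['\n'] fuel l acc = acc + l.count '\n' := by
  intro fuel
  induction fuel with
  | zero => intro l acc h
            have : l = [] := by cases l <;> simp_all
            subst this; simp [PySem.Chars.count.go]
  | succ f ih =>
    intro l acc h
    cases l with
    | nil => simp [PySem.Chars.count.go]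
    | cons c rest =>
      by_cases hc : c = '\n'
      · subst hc
        rw [PySem.Chars.count.go]
        have hpre : List.isPrefixOf ['\n'] ('\n' :: rest) = true := by simp [List.isPrefixOf]
        rw [if_pos hpre]
        rw [show List.drop (List.length ['\n']) ('\n'::rest) = rest by simp]
        rw [ih rest (acc+1) (by simpa using Nat.le_of_succ_le_succ h)]
        simp
        omega
      · rw [PySem.Chars.count.go]
        have hpre : List.isPrefixOf ['\n'] (c :: rest) = false := by
          simp [List.isPrefixOf]; exact fun hh => absurd hh.symm hc
        rw [if_neg (by simp [hpre])]
        rw [ih rest acc (by simpa using Nat.le_of_succ_le_succ h)]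
        simp [hc]

theorem count_newline (cs : List Char) : PySem.Chars.count cs ['\n'] = cs.count '\n' := by
  rw [PySem.Chars.count]
  simp [count_go_newline cs.length cs 0 (le_refl _)]

-- code.split('\n') computes mySplit
theorem split_eq_mySplit (code : String) :
    (PySem.Str.split? code "\n").getD []
      = (mySplit code.toList).map String.ofList := by
  rw [PySem.Str.split?, PySem.Chars.split?]
  rw [show ("\n" : String).toList = ['\n'] from rfl]
  simp [splitOn_newline]

-- the String loop is the Chars loop under the map
theorem pvALoop_map (p : Int) : ∀ (ls : List (List Char)) (cc : Int),
    pvALoop p (ls.map String.ofList) cc = (pvCLoop p ls cc).map String.ofList := by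
  intro ls
  induction ls with
  | nil => intro cc; simp [pvALoop, pvCLoop]
  | cons l rest ih =>
    intro cc
    simp only [List.map_cons, pvALoop, pvCLoop, PySem.Str.len, String.toList_ofList]
    split_ifs <;> simp [ih]

-- shifting the accumulator into the threshold
theorem pvCLoop_shift : ∀ (ls : List (List Char)) (p cc : Int),
    pvCLoop p ls cc = pvCLoop (p - cc) ls 0 := by
  intro ls
  induction ls with
  | nil => intro p cc; simp [pvCLoop]
  | cons l rest ih =>
    intro p cc
    simp only [pvCLoop]
    by_cases h : cc + l.length + 1 > p
    · rw [if_pos h, if_pos (by omega)]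
    · rw [if_neg h, if_neg (by omega)]
      rw [ih p (cc + l.length + 1), ih (p - cc) (0 + l.length + 1)]
      ring_nf

-- a newline-free line contributes no newlines to any prefix
theorem count_take_free (l : List Char) (h : '\n' ∉ l) (n : Nat) :
    (l.take n).count '\n' = 0 := by
  rw [List.count_eq_zero]
  exact fun hm => h (List.mem_of_mem_take hm)

-- MAIN: A's loop result is the line indexed by the prefix newline count
theorem main_lemma : ∀ (ls : List (List Char)) (p : Int), ls ≠ [] →
    (∀ l ∈ ls, '\n' ∉ l) →
    resC p ls = ls.getD (((joinNL ls).take (max p 0).toNat).count '\n') [] := by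
  intro ls
  induction ls with
  | nil => intro p h; exact absurd rfl h
  | cons l rest ih =>
    intro p _ hfree
    have hl : '\n' ∉ l := hfree l List.mem_cons_self
    cases rest with
    | nil =>
      have hres : resC p [l] = l := by
        simp only [resC, pvCLoop]
        split_ifs <;> simp
      simp only [joinNL, count_take_free l hl, hres, List.getD_cons_zero]
    | cons r t =>
      have hfree' : ∀ x ∈ r :: t, '\n' ∉ x := fun x hx => hfree x (List.mem_cons_of_mem _ hx)
      have hj : joinNL (l :: r :: t) = l ++ '\n' :: joinNL (r :: t) := rfl
      by_cases hp : (0 : Int) + l.length + 1 > p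
      · -- the first line already wins: position ≤ len(l)
        have h1 : resC p (l :: r :: t) = l := by
          simp only [resC, pvCLoop]
          rw [if_pos hp]
        have hn : (max p 0).toNat ≤ l.length := by omega
        rw [h1, hj, List.take_append,
            show (max p 0).toNat - l.length = 0 by omega]
        simp [count_take_free l hl]
      · -- recurse past line l, dropping len(l)+1 characters of the threshold
        have hstep : pvCLoop p (l :: r :: t) 0 = pvCLoop (p - l.length - 1) (r :: t) 0 := by
          rw [pvCLoop]
          simp only [if_neg hp]
          rw [pvCLoop_shift (r :: t) p (0 + l.length + 1),
              show p - (0 + (l.length : Int) + 1) = p - l.length - 1 by ring]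
        have h1 : resC p (l :: r :: t) = resC (p - l.length - 1) (r :: t) := by
          simp only [resC, hstep]
          cases pvCLoop (p - l.length - 1) (r :: t) 0 <;> simp [List.getLast?_cons_cons]
        have hlen : l.length ≤ (max p 0).toNat := by omega
        rw [h1, ih (p - l.length - 1) (by simp) hfree', hj,
            List.take_append, List.take_of_length_le hlen,
            show (max p 0).toNat - l.length = ((max p 0).toNat - l.length - 1) + 1 by omega,
            List.take_succ_cons, List.count_append, List.count_cons_self,
            List.count_eq_zero.mpr hl,
            show (max p 0).toNat - l.length - 1 = (max (p - l.length - 1) 0).toNat by omega]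
        simp

-- evaluation of port A down to resC
theorem A_eval (code : String) (p : Int) :
    get_line_at_position_py code p = String.ofList (resC p (mySplit code.toList)) := by
  unfold get_line_at_position_py
  dsimp only []
  rw [split_eq_mySplit, pvALoop_map]
  unfold resC
  cases h : pvCLoop p (mySplit code.toList) 0 with
  | some l => simp
  | none =>
    have hne := mySplit_ne_nil code.toList
    simp only [Option.map_none]
    rw [if_neg (by simp [hne])]
    rw [PySem.List.pyGet?_neg_one, List.getLast?_map]
    cases hg : (mySplit code.toList).getLast? with
    | none => exact absurd (List.getLast?_eq_none_iff.mp hg) hne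
    | some g => simp

-- evaluation of port B down to the prefix newline count
theorem B_eval (code : String) (p : Int) :
    get_line_at_position_py_alt code p
      = String.ofList ((mySplit code.toList).getD
          ((code.toList.take (max p 0).toNat).count '\n') []) := by
  unfold get_line_at_position_py_alt
  dsimp only []
  rw [split_eq_mySplit]
  rw [PySem.Str.count_eq, PySem.Str.toList_slice,
      show ("\n" : String).toList = ['\n'] from rfl,
      PySem.Chars.slice_eq_listSlice,
      PySem.List.slice_to code.toList (le_max_right p 0), count_newline]
  rw [show ("" : String) = String.ofList [] from rfl]
  rw [List.getD_eq_getElem?_getD, List.getD_eq_getElem?_getD, List.getElem?_map]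
  cases (mySplit code.toList)[(code.toList.take (max p 0).toNat).count '\n']? <;> simp

-- ===== VERDICT (by name: the statement is the Claim_ definition above) =====
theorem get_line_at_position_py_spec : Claim_equal_get_line_at_position_py := by
  intro code position _
  unfold Spec_get_line_at_position_py
  rw [A_eval, B_eval]
  have := main_lemma (mySplit code.toList) position (mySplit_ne_nil _) (free_mySplit _)
  rw [joinNL_mySplit] at this
  rw [this]
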